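-- pv_equiv track=rewrite | github.com/Conflit-de-Bus/advent_2021 | day_4/day_4.py | _display_case
-- ===== SOURCE A (Python) =====
-- def _display_case(number, drawn, number_length):
--     result = ""
--     for i in range(number_length - 2):
--         result += " "
--     result = f"  {str(number)[::-1]}{result}"
--     if drawn:
--         result = f"X{result[1:]}"
--     return result[0:number_length][::-1]
-- ===== SOURCE B (Python) =====
-- def _display_case(number, drawn, number_length):
--     if number_length <= 0:
--         return ""
--     ideal = " " * (number_length - 2) + str(number) + (" X" if drawn else "  ")
--     return ideal[-number_length:]
-- ===== Notes on version B (the rewrite author's own statement) =====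
-- stated objective: simpler
-- what changed: B builds the already-reversed padded string directly (padding + str(number) + marker) and takes its last number_length characters with one tail slice, instead of A's character-append loop, double reversal and front slice.
-- intended difference: For negative number_length small enough in magnitude that A's negative front-slice still leaves characters (number_length < 0 and 2 + len(str(number)) + number_length > 0), A returns a reversed truncated fragment (an artefact of Python's negative slice stop), while B returns the empty string, the intended display for a non-positive width. — e.g. on _display_case(5, false, -1): A returns " ", B returns ""
import Mathlib
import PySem

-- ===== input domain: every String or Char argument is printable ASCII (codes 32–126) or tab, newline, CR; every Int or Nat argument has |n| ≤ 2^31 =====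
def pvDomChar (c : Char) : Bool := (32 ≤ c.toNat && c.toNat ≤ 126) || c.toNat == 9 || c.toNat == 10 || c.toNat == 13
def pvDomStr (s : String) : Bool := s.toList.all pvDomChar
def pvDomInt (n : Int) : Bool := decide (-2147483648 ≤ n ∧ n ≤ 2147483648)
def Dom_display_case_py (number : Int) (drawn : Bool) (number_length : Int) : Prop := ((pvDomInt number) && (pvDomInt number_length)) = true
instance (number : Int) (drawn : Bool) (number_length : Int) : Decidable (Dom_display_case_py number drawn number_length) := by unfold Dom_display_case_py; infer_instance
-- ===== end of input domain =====

-- B replaces A's append-loop, double string reversal and front slice by building the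
-- already-reversed padded string directly and taking one tail slice (objective: simpler).

-- ===== PORT A =====
-- literal port of A on List Char; s[::-1] is list reversal (PySem.List.slice?_none_none_neg_one)
def display_case_py (number : Int) (drawn : Bool) (number_length : Int) : String :=
  -- the loop body 'result += " "' appends one space per iteration; the spaces are accumulated
  -- in reverse (constant-time step) and restored by the final .reverse — the same string after
  -- every iteration count, since every appended character is ' '
  let result : List Char :=
    ((PySem.List.pyRange 0 (number_length - 2) 1).foldl (fun acc _ => ' ' :: acc) []).reverse
  let result : List Char := ' ' :: ' ' :: ((PySem.Int.toChars number).reverse ++ result)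
  let result : List Char :=
    if drawn then 'X' :: PySem.List.slice result (some 1) none else result
  String.ofList (PySem.List.slice result (some 0) (some number_length)).reverse

-- ===== PORT B =====
def display_case_py_alt (number : Int) (drawn : Bool) (number_length : Int) : String :=
  if number_length ≤ 0 then "" else
    let ideal : List Char :=
      PySem.List.pyRepeat [' '] (number_length - 2) ++ PySem.Int.toChars number ++
        (if drawn then [' ', 'X'] else [' ', ' '])
    String.ofList (PySem.List.slice ideal (some (-number_length)) none)

-- ===== PRECONDITION & SPEC =====
-- A returns a reversed truncated fragment for slightly-negative widths (negative slice-stop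
-- artefact); B returns "" there, the intended display for a non-positive width.
def D_display_case_py (number : Int) (drawn : Bool) (number_length : Int) : Prop :=
  number_length < 0 ∧ 0 < 2 + (PySem.Int.toChars number).length + number_length
instance (number : Int) (drawn : Bool) (number_length : Int) : Decidable (D_display_case_py number drawn number_length) := by unfold D_display_case_py; infer_instance

def Spec_display_case_py (number : Int) (drawn : Bool) (number_length : Int) (out : String) : Prop := ¬ D_display_case_py number drawn number_length → out = display_case_py_alt number drawn number_length
instance (number : Int) (drawn : Bool) (number_length : Int) (out : String) : Decidable (Spec_display_case_py number drawn number_length out) := by unfold Spec_display_case_py; infer_instance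

def pvDiffWitness_display_case_py : Int × Bool × Int := (5, false, -1)
def pvDiffWitnessOut_display_case_py : String × String := ("  ", "")

-- ===== CLAIM (what is proved, stated in full; the proofs are below) =====
def Claim_unchanged_display_case_py : Prop := ∀ (number : Int) (drawn : Bool) (number_length : Int), Dom_display_case_py number drawn number_length → Spec_display_case_py number drawn number_length (display_case_py number drawn number_length)
def Claim_changed_display_case_py : Prop := Dom_display_case_py (pvDiffWitness_display_case_py.1) (pvDiffWitness_display_case_py.2.1) (pvDiffWitness_display_case_py.2.2) ∧ D_display_case_py (pvDiffWitness_display_case_py.1) (pvDiffWitness_display_case_py.2.1) (pvDiffWitness_display_case_py.2.2) ∧ display_case_py (pvDiffWitness_display_case_py.1) (pvDiffWitness_display_case_py.2.1) (pvDiffWitness_display_case_py.2.2) = pvDiffWitnessOut_display_case_py.1 ∧ display_case_py_alt (pvDiffWitness_display_case_py.1) (pvDiffWitness_display_case_py.2.1) (pvDiffWitness_display_case_py.2.2) = pvDiffWitnessOut_display_case_py.2 ∧ pvDiffWitnessOut_display_case_py.1 ≠ pvDiffWitnessOut_display_case_py.2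
def Claim_exact_display_case_py : Prop := ∀ (number : Int) (drawn : Bool) (number_length : Int), Dom_display_case_py number drawn number_length → D_display_case_py number drawn number_length → display_case_py number drawn number_length ≠ display_case_py_alt number drawn number_length

-- ===== LEMMAS AND PROOFS =====

theorem foldl_cons_const : ∀ (l : List Int) (init : List Char), l.foldl (fun acc _ => ' ' :: acc) init = List.replicate l.length ' ' ++ init := by
  intro l
  induction l with
  | nil => intro init; rfl
  | cons a t ih =>
      intro init
      simp only [List.foldl_cons, ih, List.length_cons, List.replicate_succ']
      simp [List.append_assoc]

theorem unchanged_aux : ∀ (number : Int) (drawn : Bool) (number_length : Int), ¬ D_display_case_py number drawn number_length → display_case_py number drawn number_length = display_case_py_alt number drawn number_length := by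
  intro n d l hD
  simp only [D_display_case_py, not_and, not_lt] at hD
  simp only [display_case_py, display_case_py_alt]
  by_cases hl : l ≤ 0
  · rw [if_pos hl]
    have hsp : PySem.List.pyRange 0 (l - 2) 1 = [] := PySem.List.pyRange_one_eq_nil (by omega)
    rw [hsp]
    simp only [List.foldl_nil, List.reverse_nil, List.append_nil]
    have hslice : ∀ res : List Char,
        res.length = (PySem.Int.toChars n).length + 2 →
        PySem.List.slice res (some 0) (some l) = [] := by
      intro res hlen
      rcases lt_or_eq_of_le hl with hlt | heq
      · have hle : 2 + ((PySem.Int.toChars n).length : Int) + l ≤ 0 := hD hlt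
        have hk : l = -(((-l).toNat : Nat) : Int) := by omega
        rw [PySem.List.slice_zero_start, hk,
          PySem.List.slice_to_neg_natCast _ _ (by omega)]
        have h0 : res.length - (-l).toNat = 0 := by omega
        rw [h0, List.take_zero]
      · rw [PySem.List.slice_zero_start, heq, PySem.List.slice_to _ (le_refl 0)]
        rfl
    cases d
    · simp only [Bool.false_eq_true, if_false]
      rw [hslice _ (by simp)]
      rfl
    · simp only [if_true]
      rw [PySem.List.slice_from_one, hslice _ (by simp)]
      rfl
  · rw [if_neg hl]
    have hl' : 0 < l := by omega
    have hmap : ((PySem.List.pyRange 0 (l - 2) 1).foldl (fun acc _ => ' ' :: acc) []).reverse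
        = List.replicate (l - 2).toNat ' ' := by
      rw [foldl_cons_const, List.append_nil, List.reverse_replicate,
        PySem.List.length_pyRange_one]
      congr 1
      omega
    rw [hmap, PySem.List.pyRepeat_singleton]
    have hA : ∀ ideal : List Char,
        String.ofList (PySem.List.slice ideal.reverse (some 0) (some l)).reverse
          = String.ofList (PySem.List.slice ideal (some (-l)) none) := by
      intro ideal
      have hk : -l = -((l.toNat : Nat) : Int) := by omega
      rw [PySem.List.slice_zero_start, PySem.List.slice_to _ (le_of_lt hl'),
        List.take_reverse, List.reverse_reverse, hk,
        PySem.List.slice_from_neg_natCast _ _ (by omega)]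
    cases d
    · simp only [Bool.false_eq_true, if_false]
      have hrev : (' ' :: ' ' :: ((PySem.Int.toChars n).reverse ++ List.replicate (l - 2).toNat ' '))
          = (List.replicate (l - 2).toNat ' ' ++ PySem.Int.toChars n ++ [' ', ' ']).reverse := by
        simp [List.reverse_append, List.reverse_replicate]
      rw [hrev, hA]
    · simp only [if_true]
      rw [PySem.List.slice_from_one]
      have hrev : ('X' :: (' ' :: ' ' :: ((PySem.Int.toChars n).reverse ++ List.replicate (l - 2).toNat ' ')).tail)
          = (List.replicate (l - 2).toNat ' ' ++ PySem.Int.toChars n ++ [' ', 'X']).reverse := by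
        simp [List.reverse_append, List.reverse_replicate]
      rw [hrev, hA]

theorem exact_aux : ∀ (number : Int) (drawn : Bool) (number_length : Int), D_display_case_py number drawn number_length → display_case_py number drawn number_length ≠ display_case_py_alt number drawn number_length := by
  intro n d l hD
  obtain ⟨hl, hpos⟩ := hD
  simp only [display_case_py, display_case_py_alt]
  rw [if_pos (le_of_lt hl)]
  have hsp : PySem.List.pyRange 0 (l - 2) 1 = [] := PySem.List.pyRange_one_eq_nil (by omega)
  rw [hsp]
  simp only [List.foldl_nil, List.reverse_nil, List.append_nil]
  have hk : l = -(((-l).toNat : Nat) : Int) := by omega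
  have hne : ∀ res : List Char,
      res.length = (PySem.Int.toChars n).length + 2 →
      String.ofList (PySem.List.slice res (some 0) (some l)).reverse ≠ "" := by
    intro res hlen h
    have h3 : (PySem.List.slice res (some 0) (some l)).reverse = [] := by
      simpa using congrArg String.toList h
    rw [PySem.List.slice_zero_start, hk,
      PySem.List.slice_to_neg_natCast _ _ (by omega)] at h3
    have h4 := congrArg List.length h3
    simp [List.length_take] at h4
    omega
  cases d
  · simp only [Bool.false_eq_true, if_false]
    exact hne _ (by simp)
  · simp only [if_true]
    rw [PySem.List.slice_from_one]
    exact hne _ (by simp)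

-- ===== VERDICT (by name: the statement is the Claim_ definition above) =====
theorem display_case_py_spec : Claim_unchanged_display_case_py := by
  intro n d l _ hD; exact unchanged_aux n d l hD

theorem display_case_py_changed : Claim_changed_display_case_py := by
  unfold Claim_changed_display_case_py; decide

theorem display_case_py_tight : Claim_exact_display_case_py := by
  intro n d l _ hD; exact exact_aux n d l hD
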